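-- pv_equiv track=rewrite | github.com/Aasthaengg/IBMdataset | Python_codes/p03762/s685182187.py | d_igeta
-- ===== SOURCE A (Python) =====
-- def d_igeta(N, M, X, Y):
--     tmp1 = 0
--     tmp2 = 0
--     for k, x in enumerate(X):
--         k += 1
--         tmp1 += (k - 1) * x - (N - k) * x
--     for k, y in enumerate(Y):
--         k += 1
--         tmp2 += (k - 1) * y - (M - k) * y
--     return (tmp1 * tmp2) % (10**9 + 7)
-- ===== SOURCE B (Python) =====
-- def d_igeta(N, M, X, Y):
--     # Prefix-sum pass: acc accumulates sum of pairwise differences sum_{i<j}(a_j-a_i)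
--     # via acc += i*a_i - prefix; the final term corrects for N (resp. M) when it
--     # differs from the array length, using the already-available total in prefix.
--     def pairwise_diff(arr, n):
--         acc = 0
--         prefix = 0
--         for i, v in enumerate(arr):
--             acc += i * v - prefix
--             prefix += v
--         return acc + (len(arr) - n) * prefix
--     return (pairwise_diff(X, N) * pairwise_diff(Y, M)) % (10**9 + 7)
-- ===== Notes on version B (the rewrite author's own statement) =====
-- stated objective: alternative
-- what changed: Replaces the per-element coefficient (k-1)*x-(N-k)*x with a running prefix-sum pass (acc += i*x - prefix) that accumulates the sum of pairwise differences, plus one closing correction term (len-N)*total; same linear cost, different loop invariant.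
import Mathlib
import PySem

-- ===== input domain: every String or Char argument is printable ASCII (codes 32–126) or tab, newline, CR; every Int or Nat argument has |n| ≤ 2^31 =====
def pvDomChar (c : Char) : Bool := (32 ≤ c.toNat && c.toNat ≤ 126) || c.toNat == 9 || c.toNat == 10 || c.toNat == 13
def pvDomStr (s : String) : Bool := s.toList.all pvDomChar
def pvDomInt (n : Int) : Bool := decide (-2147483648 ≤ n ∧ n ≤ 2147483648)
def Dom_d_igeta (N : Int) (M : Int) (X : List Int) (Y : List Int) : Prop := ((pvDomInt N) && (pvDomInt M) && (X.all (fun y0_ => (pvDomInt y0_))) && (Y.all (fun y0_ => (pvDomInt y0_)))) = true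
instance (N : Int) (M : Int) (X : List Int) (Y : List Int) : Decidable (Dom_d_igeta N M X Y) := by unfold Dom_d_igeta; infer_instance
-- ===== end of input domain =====

-- B replaces the per-element coefficient (k-1)*x-(N-k)*x by a running prefix-sum pass
-- plus one closing correction term; same linear cost (objective: alternative).

-- ===== PORT A =====
def d_igeta (N : Int) (M : Int) (X : List Int) (Y : List Int) : Int :=
  let tmp1 := (PySem.List.enumerate X).foldl
    (fun tmp p => let k := p.1 + 1; tmp + ((k - 1) * p.2 - (N - k) * p.2)) 0
  let tmp2 := (PySem.List.enumerate Y).foldl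
    (fun tmp p => let k := p.1 + 1; tmp + ((k - 1) * p.2 - (M - k) * p.2)) 0
  PySem.Int.mod (tmp1 * tmp2) (10 ^ 9 + 7)

-- ===== PORT B =====
def pvPairDiff (arr : List Int) (n : Int) : Int :=
  let r := (PySem.List.enumerate arr).foldl
    (fun (s : Int × Int) p => (s.1 + p.1 * p.2 - s.2, s.2 + p.2)) (0, 0)
  r.1 + ((arr.length : Int) - n) * r.2

def d_igeta_alt (N : Int) (M : Int) (X : List Int) (Y : List Int) : Int :=
  PySem.Int.mod (pvPairDiff X N * pvPairDiff Y M) (10 ^ 9 + 7)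

-- ===== PRECONDITION & SPEC =====
def Spec_d_igeta (N : Int) (M : Int) (X : List Int) (Y : List Int) (out : Int) : Prop := out = d_igeta_alt N M X Y
instance (N : Int) (M : Int) (X : List Int) (Y : List Int) (out : Int) : Decidable (Spec_d_igeta N M X Y out) := by unfold Spec_d_igeta; infer_instance

-- ===== CLAIM (what is proved, stated in full; the proofs are below) =====
def Claim_equal_d_igeta : Prop := ∀ (N : Int) (M : Int) (X : List Int) (Y : List Int), Dom_d_igeta N M X Y → Spec_d_igeta N M X Y (d_igeta N M X Y)

-- ===== LEMMAS AND PROOFS =====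

-- A's loop from accumulator tmp equals B's prefix-sum loop from (acc, pre) with the
-- suffix-aware correction ((|arr| + s) - n) * total, up to the stated affine offset.
theorem pv_key (n : Int) : ∀ (arr : List Int) (s tmp acc pre : Int),
    (PySem.List.enumerate arr s).foldl
      (fun tmp p => let k := p.1 + 1; tmp + ((k - 1) * p.2 - (n - k) * p.2)) tmp
    = tmp - acc - (s - n) * pre +
      (let r := (PySem.List.enumerate arr s).foldl
        (fun (q : Int × Int) p => (q.1 + p.1 * p.2 - q.2, q.2 + p.2)) (acc, pre);
       r.1 + ((arr.length : Int) + s - n) * r.2) := by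
  intro arr
  induction arr with
  | nil => intro s tmp acc pre; simp [PySem.List.enumerate_nil]
  | cons x xs ih =>
      intro s tmp acc pre
      simp only [PySem.List.enumerate_cons, List.foldl_cons, List.length_cons]
      rw [ih (s + 1) (tmp + ((s + 1 - 1) * x - (n - (s + 1)) * x)) (acc + s * x - pre) (pre + x)]
      push_cast
      ring

theorem d_igeta_eq (N M : Int) (X Y : List Int) : d_igeta N M X Y = d_igeta_alt N M X Y := by
  unfold d_igeta d_igeta_alt pvPairDiff
  have hX := pv_key N X 0 0 0 0
  have hY := pv_key M Y 0 0 0 0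
  rw [hX, hY]
  ring_nf

-- ===== VERDICT (by name: the statement is the Claim_ definition above) =====
theorem d_igeta_spec : Claim_equal_d_igeta := by
  intro N M X Y _
  unfold Spec_d_igeta
  exact d_igeta_eq N M X Y
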